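-- pv_equiv track=rewrite | github.com/Junoflows/CodingTest | 프로그래머스/lv1/131128. 숫자 짝꿍/숫자 짝꿍.py | solution
-- ===== SOURCE A (Python) =====
-- import collections
--
-- def solution(X, Y):
--     li_x = list(X)
--     li_y = list(Y)
--     dict_x = collections.Counter(li_x)
--     dict_y = collections.Counter(li_y)
--     key_x = list(dict_x.keys())
--     key_y = list(dict_y.keys())
--     temp = []
--     i = 0
--     while i < len(key_x):
--         if key_x[i] in key_y:
--             tmp = key_x[i]
--             if dict_x[tmp]>0 and dict_y[tmp]>0:
--                 dict_x[tmp] -= 1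
--                 dict_y[tmp] -= 1
--                 temp.append(tmp)
--             else:
--                 i += 1
--                 continue
--         else:
--             i += 1
--
--     # for i in range(len(X)):
--     #     tmp = li_x.pop()
--     #     if tmp in li_y :
--     #         li_y.remove(tmp)
--     #         temp.append(tmp)
--
--     temp.sort(reverse = True)
--     if len(temp) == 0:
--         return '-1'
--     if temp.count('0') == len(temp):
--         return '0'
--     return (''.join(temp))
-- ===== SOURCE B (Python) =====
-- def solution(X, Y):
--     xs = sorted(X, reverse=True)
--     ys = sorted(Y, reverse=True)
--     out = []
--     i = j = 0
--     while i < len(xs) and j < len(ys):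
--         if xs[i] == ys[j]:
--             out.append(xs[i])
--             i += 1
--             j += 1
--         elif xs[i] > ys[j]:
--             i += 1
--         else:
--             j += 1
--     if not out:
--         return '-1'
--     if out[0] == '0' and out[-1] == '0':
--         return '0'
--     return ''.join(out)
-- ===== Notes on version B (the rewrite author's own statement) =====
-- stated objective: alternative
-- what changed: A drains mutable Counters key by key (re-scanning Y's key list per occurrence) and then comparison-sorts the collected occurrence list; B never builds counters: it sorts both strings descending once and runs a two-pointer merge over the two sorted sequences, emitting each matched character directly in order, with the all-zeros case read off the first and last emitted characters.
import Mathlib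
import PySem

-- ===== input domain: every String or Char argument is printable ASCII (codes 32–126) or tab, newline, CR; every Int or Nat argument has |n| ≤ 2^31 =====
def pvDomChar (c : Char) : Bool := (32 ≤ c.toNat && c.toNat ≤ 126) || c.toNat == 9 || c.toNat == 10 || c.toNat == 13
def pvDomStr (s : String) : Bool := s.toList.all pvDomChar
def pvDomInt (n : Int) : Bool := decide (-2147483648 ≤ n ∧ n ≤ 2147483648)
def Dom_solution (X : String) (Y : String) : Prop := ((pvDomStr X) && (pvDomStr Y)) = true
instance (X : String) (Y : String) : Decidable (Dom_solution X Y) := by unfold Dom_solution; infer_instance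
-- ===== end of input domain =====

-- B replaces A's counter-draining while loop plus final reverse sort of the occurrence list by a
-- two-pointer merge over the two strings sorted descending (no counters, no sort of the result);
-- objective: alternative (different algorithm of similar cost).

-- ===== PORT A =====
-- the 'while i < len(key_x)' loop of A: state (dict_x, dict_y, i, temp); only temp is used afterwards
def aLoop (key_x key_y : List Char) (dx dy : PySem.Dict Char Int) (i : Nat) (temp : List Char) : List Char :=
  if h : i < key_x.length then
    let tmp := key_x[i]
    if tmp ∈ key_y then
      if dx.getD tmp 0 > 0 ∧ dy.getD tmp 0 > 0 then
        aLoop key_x key_y (dx.insert tmp (dx.getD tmp 0 - 1)) (dy.insert tmp (dy.getD tmp 0 - 1)) i (temp ++ [tmp])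
      else aLoop key_x key_y dx dy (i+1) temp
    else aLoop key_x key_y dx dy (i+1) temp
  else temp
termination_by (key_x.length - i, (dx.getD (key_x.getD i ' ') 0).toNat)
decreasing_by
  · apply Prod.Lex.right
    rename_i hcond
    simp only [List.getD_eq_getElem?_getD, List.getElem?_eq_getElem h, Option.getD_some]
    rw [PySem.Dict.getD_insert]; simp only [if_true]
    simp only [show tmp = key_x[i] from rfl] at hcond
    omega
  · apply Prod.Lex.left; omega
  · apply Prod.Lex.left; omega

def solution (X : String) (Y : String) : String :=
  let li_x := X.toList
  let li_y := Y.toList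
  let dict_x := PySem.Dict.counter li_x
  let dict_y := PySem.Dict.counter li_y
  let key_x := dict_x.keys
  let key_y := dict_y.keys
  let temp := aLoop key_x key_y dict_x dict_y 0 []
  let temp2 := PySem.List.sorted temp (fun c => c) true    -- temp.sort(reverse=True)
  if temp2.length = 0 then "-1"
  else if temp2.count '0' = temp2.length then "0"
  else String.ofList temp2                                 -- ''.join of a list of single chars

-- ===== PORT B =====
-- the 'while i < len(xs) and j < len(ys)' two-pointer loop of B
def bMerge (xs ys : List Char) (i j : Nat) (out : List Char) : List Char :=
  if h : i < xs.length ∧ j < ys.length then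
    if xs[i]'h.1 = ys[j]'h.2 then bMerge xs ys (i+1) (j+1) (out ++ [xs[i]'h.1])
    else if ys[j]'h.2 < xs[i]'h.1 then bMerge xs ys (i+1) j out
    else bMerge xs ys i (j+1) out
  else out
termination_by (xs.length - i) + (ys.length - j)

def solution_alt (X : String) (Y : String) : String :=
  let xs := PySem.List.sorted X.toList (fun c => c) true   -- sorted(X, reverse=True)
  let ys := PySem.List.sorted Y.toList (fun c => c) true
  let out := bMerge xs ys 0 0 []
  if out = [] then "-1"                                    -- if not out
  else if out.head? = some '0' ∧ out.getLast? = some '0'   -- out[0]=='0' and out[-1]=='0' (nonempty here)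
  then "0"
  else String.ofList out                                   -- ''.join of a list of single chars

-- ===== PRECONDITION & SPEC =====
def Spec_solution (X : String) (Y : String) (out : String) : Prop := out = solution_alt X Y
instance (X : String) (Y : String) (out : String) : Decidable (Spec_solution X Y out) := by unfold Spec_solution; infer_instance

-- ===== CLAIM (what is proved, stated in full; the proofs are below) =====
def Claim_equal_solution : Prop := ∀ (X : String) (Y : String), Dom_solution X Y → Spec_solution X Y (solution X Y)

-- ===== LEMMAS AND PROOFS =====

-- per-character block A produces: min of the two multiplicities, as copies of k
def emit (dx dy : PySem.Dict Char Int) (k : Char) : List Char :=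
  List.replicate (min (dx.getD k 0) (dy.getD k 0)).toNat k

-- list-level restatement of B's index-based two-pointer loop (proof device only)
def mergeL : List Char → List Char → List Char
  | x :: xs, y :: ys =>
      if x = y then x :: mergeL xs ys
      else if y < x then mergeL xs (y :: ys)
      else mergeL (x :: xs) ys
  | _, _ => []

-- A's while loop drains each remaining (distinct) key to min of its two counts, in key order
theorem aLoop_spec (key_x key_y : List Char) (dx dy : PySem.Dict Char Int) (i : Nat) (temp : List Char)
    (hnd : (key_x.drop i).Nodup) :
    aLoop key_x key_y dx dy i temp =
      temp ++ (key_x.drop i).flatMap (fun k => if k ∈ key_y then emit dx dy k else []) := by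
  revert hnd
  induction dx, dy, i, temp using aLoop.induct (key_x := key_x) (key_y := key_y) with
  | case1 dx dy i temp h tmp hmem hpos ih =>
    intro hnd
    have htmp : (tmp : Char) = key_x[i] := rfl
    rw [htmp] at hmem hpos ih
    rw [aLoop]
    simp only [dif_pos h, if_pos hmem, if_pos hpos]
    rw [ih hnd]
    have hdrop : List.drop i key_x = key_x[i] :: List.drop (i+1) key_x := List.drop_eq_getElem_cons h
    have hnotmem : key_x[i] ∉ List.drop (i+1) key_x := by
      rw [hdrop] at hnd; exact (List.nodup_cons.mp hnd).1
    rw [hdrop, List.flatMap_cons, List.flatMap_cons, if_pos hmem, if_pos hmem]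
    have hhead : [key_x[i]] ++ emit (dx.insert key_x[i] (dx.getD key_x[i] 0 - 1))
        (dy.insert key_x[i] (dy.getD key_x[i] 0 - 1)) key_x[i] = emit dx dy key_x[i] := by
      unfold emit
      rw [PySem.Dict.getD_insert, PySem.Dict.getD_insert]
      simp only [if_pos trivial]
      have hm : (min (dx.getD key_x[i] 0 - 1) (dy.getD key_x[i] 0 - 1)).toNat
          = (min (dx.getD key_x[i] 0) (dy.getD key_x[i] 0)).toNat - 1 := by omega
      have hp : (min (dx.getD key_x[i] 0) (dy.getD key_x[i] 0)).toNat
          = ((min (dx.getD key_x[i] 0) (dy.getD key_x[i] 0)).toNat - 1) + 1 := by omega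
      rw [hm, hp, List.replicate_succ]
      simp
    have htail : List.flatMap
        (fun k => if k ∈ key_y then emit (dx.insert key_x[i] (dx.getD key_x[i] 0 - 1))
            (dy.insert key_x[i] (dy.getD key_x[i] 0 - 1)) k else [])
        (List.drop (i+1) key_x)
        = List.flatMap (fun k => if k ∈ key_y then emit dx dy k else []) (List.drop (i+1) key_x) := by
      rw [List.flatMap_def, List.flatMap_def]
      congr 1
      apply List.map_congr_left
      intro x hx
      have hne : key_x[i] ≠ x := fun he => hnotmem (he ▸ hx)
      unfold emit
      rw [PySem.Dict.getD_insert, PySem.Dict.getD_insert]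
      simp only [if_neg (Ne.symm hne)]
    rw [htail]
    rw [← hhead]
    simp
  | case2 dx dy i temp h tmp hmem hpos ih =>
    intro hnd
    have htmp : (tmp : Char) = key_x[i] := rfl
    rw [htmp] at hmem hpos
    rw [aLoop]
    simp only [dif_pos h, if_pos hmem, if_neg hpos]
    have hdrop : List.drop i key_x = key_x[i] :: List.drop (i+1) key_x := List.drop_eq_getElem_cons h
    have hnd' : (List.drop (i+1) key_x).Nodup := by
      rw [hdrop] at hnd; exact (List.nodup_cons.mp hnd).2
    rw [ih hnd', hdrop, List.flatMap_cons, if_pos hmem]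
    have : emit dx dy key_x[i] = [] := by
      unfold emit
      have : (min (dx.getD key_x[i] 0) (dy.getD key_x[i] 0)).toNat = 0 := by
        rcases not_and_or.mp hpos with hc | hc <;> omega
      rw [this]; rfl
    rw [this]; simp
  | case3 dx dy i temp h tmp hmem ih =>
    intro hnd
    have htmp : (tmp : Char) = key_x[i] := rfl
    rw [htmp] at hmem
    rw [aLoop]
    simp only [dif_pos h, if_neg hmem]
    have hdrop : List.drop i key_x = key_x[i] :: List.drop (i+1) key_x := List.drop_eq_getElem_cons h
    have hnd' : (List.drop (i+1) key_x).Nodup := by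
      rw [hdrop] at hnd; exact (List.nodup_cons.mp hnd).2
    rw [ih hnd', hdrop, List.flatMap_cons, if_neg hmem]
    simp
  | case4 dx dy i temp h =>
    intro hnd
    rw [aLoop]
    simp only [dif_neg h]
    rw [List.drop_of_length_le (by omega)]
    simp

-- the guard 'k ∈ key_y' is redundant against counters: a missing key has count 0, so min is 0
theorem emit_guard (xs ys : List Char) (k : Char) :
    (if k ∈ (PySem.Dict.counter (κ := Char) ys).keys then emit (PySem.Dict.counter xs) (PySem.Dict.counter ys) k else []) =
      emit (PySem.Dict.counter xs) (PySem.Dict.counter ys) k := by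
  by_cases hk : k ∈ (PySem.Dict.counter (κ := Char) ys).keys
  · rw [if_pos hk]
  · rw [if_neg hk]
    unfold emit
    rw [PySem.Dict.getD_counter, PySem.Dict.getD_counter]
    rw [PySem.Dict.keys_counter] at hk
    have : k ∉ ys := fun h => hk (by simpa [PySem.Set.mem_ofList] using h)
    simp [List.count_eq_zero_of_not_mem this]

-- A's occurrence count per character: min of the multiplicities in X and Y
theorem count_flatMap_emit (dx dy : PySem.Dict Char Int) (ks : List Char) (hnd : ks.Nodup) (c : Char) :
    (ks.flatMap (emit dx dy)).count c =
      if c ∈ ks then (min (dx.getD c 0) (dy.getD c 0)).toNat else 0 := by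
  induction ks with
  | nil => simp
  | cons k ks ih =>
    rw [List.nodup_cons] at hnd
    rw [List.flatMap_cons, List.count_append, ih hnd.2]
    unfold emit
    rw [List.count_replicate]
    by_cases hc : c = k
    · subst hc
      simp [hnd.1]
    · rw [if_neg (fun h => hc (beq_iff_eq.mp h).symm)]
      simp [List.mem_cons, hc]

-- every element B's merge emits comes from its left input
theorem mergeL_subset_left (xs ys : List Char) : ∀ z ∈ mergeL xs ys, z ∈ xs := by
  induction xs, ys using mergeL.induct with
  | case1 xs y ys ih =>
    intro z hz
    rw [mergeL, if_pos rfl] at hz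
    rcases List.mem_cons.mp hz with h | h
    · simp [h]
    · exact List.mem_cons_of_mem _ (ih z h)
  | case2 x xs y ys hne hlt ih =>
    intro z hz
    rw [mergeL, if_neg hne, if_pos hlt] at hz
    exact List.mem_cons_of_mem _ (ih z hz)
  | case3 x xs y ys hne hnlt ih =>
    intro z hz
    rw [mergeL, if_neg hne, if_neg hnlt] at hz
    exact ih z hz
  | case4 l1 l2 h =>
    intro z hz
    cases l1 with
    | nil => simp [mergeL] at hz
    | cons a as =>
      cases l2 with
      | nil => simp [mergeL] at hz
      | cons b bs => exact (h a as b bs rfl rfl).elim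

-- B's merge of two descending lists is descending
theorem mergeL_pairwise (xs ys : List Char) :
    xs.Pairwise (fun a b => b ≤ a) → ys.Pairwise (fun a b => b ≤ a) →
    (mergeL xs ys).Pairwise (fun a b : Char => b ≤ a) := by
  induction xs, ys using mergeL.induct with
  | case1 xs y ys ih =>
    intro hx hy
    rw [List.pairwise_cons] at hx hy
    rw [mergeL, if_pos rfl, List.pairwise_cons]
    exact ⟨fun z hz => hx.1 z (mergeL_subset_left _ _ _ hz), ih hx.2 hy.2⟩
  | case2 x xs y ys hne hlt ih =>
    intro hx hy
    rw [List.pairwise_cons] at hx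
    rw [mergeL, if_neg hne, if_pos hlt]
    exact ih hx.2 hy
  | case3 x xs y ys hne hnlt ih =>
    intro hx hy
    rw [List.pairwise_cons] at hy
    rw [mergeL, if_neg hne, if_neg hnlt]
    exact ih hx hy.2
  | case4 l1 l2 h =>
    intro hx hy
    cases l1 with
    | nil => simp [mergeL]
    | cons a as =>
      cases l2 with
      | nil => simp [mergeL]
      | cons b bs => exact (h a as b bs rfl rfl).elim

-- B's merge count per character: min of the multiplicities of the two (descending) inputs
theorem mergeL_count (xs ys : List Char) :
    xs.Pairwise (fun a b => b ≤ a) → ys.Pairwise (fun a b => b ≤ a) →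
    ∀ c : Char, (mergeL xs ys).count c = min (xs.count c) (ys.count c) := by
  induction xs, ys using mergeL.induct with
  | case1 xs y ys ih =>
    intro hx hy c
    rw [List.pairwise_cons] at hx hy
    rw [mergeL, if_pos rfl, List.count_cons, List.count_cons, List.count_cons, ih hx.2 hy.2 c]
    split_ifs <;> omega
  | case2 x xs y ys hne hlt ih =>
    intro hx hy c
    rw [List.pairwise_cons] at hx
    rw [mergeL, if_neg hne, if_pos hlt, ih hx.2 hy c]
    by_cases hc : c = x
    · subst hc
      have h0 : (y :: ys).count c = 0 := by
        apply List.count_eq_zero_of_not_mem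
        intro hmem
        rcases List.mem_cons.mp hmem with h | h
        · exact absurd h.symm (ne_of_lt hlt)
        · exact absurd ((List.pairwise_cons.mp hy).1 c h) (not_le.mpr hlt)
      rw [h0]
      simp
    · rw [List.count_cons_of_ne (fun h => hc h.symm)]
  | case3 x xs y ys hne hnlt ih =>
    intro hx hy c
    have hxy : x < y := lt_of_le_of_ne (not_lt.mp hnlt) hne
    rw [List.pairwise_cons] at hy
    rw [mergeL, if_neg hne, if_neg hnlt, ih hx hy.2 c]
    by_cases hc : c = y
    · subst hc
      have h0 : (x :: xs).count c = 0 := by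
        apply List.count_eq_zero_of_not_mem
        intro hmem
        rcases List.mem_cons.mp hmem with h | h
        · exact absurd h.symm (ne_of_lt hxy)
        · exact absurd ((List.pairwise_cons.mp hx).1 c h) (not_le.mpr hxy)
      rw [h0]
      simp
    · rw [List.count_cons_of_ne (fun h => hc h.symm)]
  | case4 l1 l2 h =>
    intro hx hy c
    cases l1 with
    | nil => simp [mergeL]
    | cons a as =>
      cases l2 with
      | nil => simp [mergeL]
      | cons b bs => exact (h a as b bs rfl rfl).elim

-- the index two-pointer loop of the port is the list-level merge of the remaining suffixes
theorem bMerge_eq (xs ys : List Char) (i j : Nat) (out : List Char) :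
    bMerge xs ys i j out = out ++ mergeL (xs.drop i) (ys.drop j) := by
  induction i, j, out using bMerge.induct (xs := xs) (ys := ys) with
  | case1 i j out h heq ih =>
    rw [bMerge, dif_pos h, if_pos heq, ih,
        List.drop_eq_getElem_cons h.1, List.drop_eq_getElem_cons h.2, mergeL, if_pos heq]
    simp
  | case2 i j out h heq hlt ih =>
    rw [bMerge, dif_pos h, if_neg heq, if_pos hlt, ih,
        List.drop_eq_getElem_cons h.1, List.drop_eq_getElem_cons h.2, mergeL, if_neg heq, if_pos hlt]
  | case3 i j out h heq hlt ih =>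
    rw [bMerge, dif_pos h, if_neg heq, if_neg hlt, ih,
        List.drop_eq_getElem_cons h.1, List.drop_eq_getElem_cons h.2, mergeL, if_neg heq, if_neg hlt]
  | case4 i j out h =>
    rw [bMerge, dif_neg h]
    rcases not_and_or.mp h with hc | hc
    · rw [List.drop_of_length_le (Nat.le_of_not_lt hc)]
      cases ys.drop j <;> simp [mergeL]
    · have hys : ys.drop j = [] := List.drop_of_length_le (Nat.le_of_not_lt hc)
      rw [hys]
      cases xs.drop i <;> simp [mergeL]

-- two descending rearrangements of the same multiset coincide
theorem desc_unique (l₁ l₂ : List Char) (hperm : l₁.Perm l₂)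
    (h₁ : l₁.Pairwise (fun a b : Char => b ≤ a)) (h₂ : l₂.Pairwise (fun a b : Char => b ≤ a)) :
    l₁ = l₂ := by
  have := PySem.List.eq_of_perm_of_pairwise_le_of_injective (key := fun c : Char => c)
      (fun a b hab => hab)
      ((List.reverse_perm _).trans (hperm.trans (List.reverse_perm _).symm))
      (List.pairwise_reverse.mpr (by simpa using h₁))
      (List.pairwise_reverse.mpr (by simpa using h₂))
  exact List.reverse_injective this

-- the central identity: A's sorted occurrence list IS B's two-pointer merge output
theorem sorted_temp_eq_merge (X Y : String) :
    PySem.List.sorted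
        (aLoop (PySem.Dict.counter X.toList).keys (PySem.Dict.counter Y.toList).keys
          (PySem.Dict.counter X.toList) (PySem.Dict.counter Y.toList) 0 [])
        (fun c => c) true =
      bMerge (PySem.List.sorted X.toList (fun c => c) true)
             (PySem.List.sorted Y.toList (fun c => c) true) 0 0 [] := by
  set cx := PySem.Dict.counter X.toList with hcx
  set cy := PySem.Dict.counter Y.toList with hcy
  set kx := cx.keys with hkx
  have hndkx : kx.Nodup := by rw [hkx, hcx]; exact PySem.Dict.nodup_keys_counter _
  set sx := PySem.List.sorted X.toList (fun c => c) true with hsx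
  set sy := PySem.List.sorted Y.toList (fun c => c) true with hsy
  have hpx : sx.Pairwise (fun a b : Char => b ≤ a) := by
    simpa using PySem.List.sorted_pairwise_rev X.toList (fun c => c)
  have hpy : sy.Pairwise (fun a b : Char => b ≤ a) := by
    simpa using PySem.List.sorted_pairwise_rev Y.toList (fun c => c)
  -- A's loop result as a flatMap over the (distinct) keys
  have htemp : aLoop kx cy.keys cx cy 0 [] = kx.flatMap (emit cx cy) := by
    rw [aLoop_spec _ _ _ _ _ _ (by simpa using hndkx)]
    simp only [List.drop_zero, List.nil_append]
    rw [List.flatMap_def, List.flatMap_def]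
    congr 1
    apply List.map_congr_left
    intro k _
    rw [hcy, hcx]
    exact emit_guard X.toList Y.toList k
  rw [htemp, bMerge_eq]
  simp only [List.drop_zero, List.nil_append]
  -- both sides have count min(count in X, count in Y) for every character
  have hcount : ∀ c : Char, (kx.flatMap (emit cx cy)).count c = (mergeL sx sy).count c := by
    intro c
    rw [mergeL_count sx sy hpx hpy c, count_flatMap_emit cx cy kx hndkx c]
    rw [hsx, hsy, (PySem.List.sorted_perm X.toList (fun c => c) true).count_eq,
        (PySem.List.sorted_perm Y.toList (fun c => c) true).count_eq]
    by_cases hc : c ∈ kx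
    · rw [if_pos hc, hcx, hcy, PySem.Dict.getD_counter, PySem.Dict.getD_counter]
      omega
    · rw [if_neg hc]
      have : c ∉ X.toList := by
        intro h
        apply hc
        rw [hkx, hcx, PySem.Dict.keys_counter]
        simpa [PySem.Set.mem_ofList] using h
      rw [List.count_eq_zero_of_not_mem this]
      simp
  have hperm : (kx.flatMap (emit cx cy)).Perm (mergeL sx sy) := List.perm_iff_count.mpr hcount
  -- and both sides are descending, so reverse-sorting the left is the identity up to the right
  have hpwA : (PySem.List.sorted (kx.flatMap (emit cx cy)) (fun c => c) true).Pairwise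
      (fun a b : Char => b ≤ a) := by
    simpa using PySem.List.sorted_pairwise_rev (kx.flatMap (emit cx cy)) (fun c => c)
  exact desc_unique _ _
    ((PySem.List.sorted_perm _ _ _).trans hperm) hpwA (mergeL_pairwise sx sy hpx hpy)

-- in a descending nonempty list, 'all elements are 0' is equivalent to 'first and last are 0'
theorem final_branches (res : List Char) (hpw : res.Pairwise (fun a b : Char => b ≤ a)) :
    (if res.length = 0 then "-1" else if res.count '0' = res.length then "0" else String.ofList res)
      = (if res = [] then "-1"
         else if res.head? = some '0' ∧ res.getLast? = some '0' then "0" else String.ofList res) := by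
  by_cases hnil : res = []
  · subst hnil; simp
  · rw [if_neg (fun h => hnil (List.length_eq_zero_iff.mp h)), if_neg hnil]
    obtain ⟨c, cs, rfl⟩ := List.exists_cons_of_ne_nil hnil
    obtain ⟨d, ds, hds⟩ := List.exists_cons_of_ne_nil (l := (c :: cs).reverse) (by simp)
    have hlast? : (c :: cs).getLast? = some d := by
      rw [← List.head?_reverse, hds, List.head?_cons]
    have hdmem : d ∈ c :: cs := by
      have : d ∈ (c :: cs).reverse := by rw [hds]; exact List.mem_cons_self ..
      exact List.mem_reverse.mp this
    have hrev : ((c :: cs).reverse).Pairwise (fun a b : Char => a ≤ b) := by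
      rw [List.pairwise_reverse]; exact hpw
    have hlow : ∀ z ∈ c :: cs, d ≤ z := by
      intro z hz
      have hzr : z ∈ d :: ds := by rw [← hds]; exact List.mem_reverse.mpr hz
      rw [hds] at hrev
      rcases List.mem_cons.mp hzr with h | h
      · exact le_of_eq h.symm
      · exact (List.pairwise_cons.mp hrev).1 z h
    have hhigh : ∀ z ∈ c :: cs, z ≤ c := by
      intro z hz
      rcases List.mem_cons.mp hz with h | h
      · exact le_of_eq h
      · exact (List.pairwise_cons.mp hpw).1 z h
    have hiff : ((c :: cs).count '0' = (c :: cs).length) ↔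
        ((c :: cs).head? = some '0' ∧ (c :: cs).getLast? = some '0') := by
      rw [List.count_eq_length, List.head?_cons, hlast?]
      constructor
      · intro h
        exact ⟨congrArg some (h c (List.mem_cons_self ..)).symm, congrArg some (h d hdmem).symm⟩
      · rintro ⟨hh, hl⟩ z hz
        have hc0 : c = '0' := Option.some.inj hh
        have hd0 : d = '0' := Option.some.inj hl
        exact (le_antisymm (hc0 ▸ hhigh z hz) (hd0 ▸ hlow z hz)).symm
    by_cases hcz : (c :: cs).count '0' = (c :: cs).length
    · rw [if_pos hcz, if_pos (hiff.mp hcz)]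
    · rw [if_neg hcz, if_neg (fun h => hcz (hiff.mpr h))]

-- ===== VERDICT (by name: the statement is the Claim_ definition above) =====
theorem solution_spec : Claim_equal_solution := by
  intro X Y _
  unfold Spec_solution solution solution_alt
  simp only
  rw [sorted_temp_eq_merge X Y, ← sorted_temp_eq_merge X Y]
  rw [final_branches _ (by simpa using PySem.List.sorted_pairwise_rev _ (fun c => c))]
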